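-- pv_equiv track=rewrite | github.com/R19988088/TaikoMini | lib/tja_parser.py | _clean_subtitle
-- ===== SOURCE A (Python) =====
-- def _clean_subtitle(subtitle: str) -> str:
--     """
--     清理副标题字符串
--
--     参数:
--         subtitle: 原始副标题
--
--     返回:
--         清理后的副标题
--
--     规则:
--         1. 移除前导的 "--" 符号
--         2. 如果只剩下 "--" 或空字符串，返回空
--     """
--     if not subtitle:
--         return ""
--
--     subtitle = subtitle.strip()
--
--     # 移除所有前导的 "--"
--     while subtitle.startswith('--'):
--         subtitle = subtitle[2:].strip()
--
--     # 如果只剩下 "--" 或空，返回空字符串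
--     if subtitle == '--' or not subtitle:
--         return ""
--
--     return subtitle
-- ===== SOURCE B (Python) =====
-- def _clean_subtitle(subtitle: str) -> str:
--     if not subtitle:
--         return ""
--     n = len(subtitle)
--     # single forward scan: skip leading whitespace and '--' groups by index, no slicing copies
--     i = 0
--     while True:
--         while i < n and subtitle[i].isspace():
--             i += 1
--         if subtitle[i:i+2] == '--':
--             i += 2
--         else:
--             break
--     # trim trailing whitespace by index
--     j = n
--     while j > i and subtitle[j - 1].isspace():
--         j -= 1
--     return subtitle[i:j]
-- ===== Notes on version B (the rewrite author's own statement) =====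
-- stated objective: alternative
-- what changed: A repeatedly slices the string and re-strips it inside a while loop, making a new string copy per removed leading dash pair; B does a single index scan that skips leading whitespace and dash pairs and trims trailing whitespace by index, taking one final slice.
import Mathlib
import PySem

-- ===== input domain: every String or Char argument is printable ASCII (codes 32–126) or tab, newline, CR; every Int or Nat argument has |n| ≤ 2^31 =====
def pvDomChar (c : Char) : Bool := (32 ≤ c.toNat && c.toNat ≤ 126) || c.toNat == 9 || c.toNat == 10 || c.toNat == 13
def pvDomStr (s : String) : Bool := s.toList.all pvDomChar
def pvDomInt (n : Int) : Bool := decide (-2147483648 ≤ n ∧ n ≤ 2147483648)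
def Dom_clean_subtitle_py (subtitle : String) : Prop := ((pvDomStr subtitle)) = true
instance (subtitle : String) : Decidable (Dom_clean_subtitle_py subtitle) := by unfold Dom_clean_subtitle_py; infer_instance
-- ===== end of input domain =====

-- B replaces A's repeated slice-and-strip loop by a single index scan over the string (no intermediate string copies); return value only, no mutation.

-- ===== PORT A =====
-- strip length bound, needed by aLoop's termination
theorem pvStripLenLe (s : List Char) : (PySem.Chars.strip s).length ≤ s.length := by
  simp only [PySem.Chars.strip, PySem.Chars.rstrip, PySem.Chars.lstrip]
  calc ((s.dropWhile PySem.Chars.isspace).reverse.dropWhile PySem.Chars.isspace).reverse.length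
      = ((s.dropWhile PySem.Chars.isspace).reverse.dropWhile PySem.Chars.isspace).length := by simp
    _ ≤ (s.dropWhile PySem.Chars.isspace).reverse.length := List.length_dropWhile_le _ _
    _ = (s.dropWhile PySem.Chars.isspace).length := by simp
    _ ≤ s.length := List.length_dropWhile_le _ _

-- while subtitle.startswith('--'): subtitle = subtitle[2:].strip()
def aLoop (t : List Char) : List Char :=
  if PySem.Chars.startswith t ['-', '-'] then
    aLoop (PySem.Chars.strip (PySem.List.slice t (some 2) none))
  else t
termination_by t.length
decreasing_by
  rename_i h
  have h2 : ['-', '-'] <+: t := (PySem.Chars.startswith_iff t ['-', '-']).mp h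
  have hlen : 2 ≤ t.length := by
    have := h2.length_le; simpa using this
  have hs : PySem.List.slice t (some 2) none = t.drop 2 := by
    simpa using PySem.List.slice_from (xs := t) (a := 2) (by norm_num)
  rw [hs]
  have := pvStripLenLe (t.drop 2)
  have : (PySem.Chars.strip (t.drop 2)).length ≤ t.length - 2 := by simpa using this
  omega

def clean_subtitle_py (subtitle : String) : String :=
  if subtitle = "" then ""
  else if aLoop (PySem.Chars.strip subtitle.toList) = ['-', '-'] ∨
          aLoop (PySem.Chars.strip subtitle.toList) = [] then ""
  else String.ofList (aLoop (PySem.Chars.strip subtitle.toList))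

-- ===== PORT B =====
-- while i < n and subtitle[i].isspace(): i += 1
def bSkipWs (cs : List Char) (i : Nat) : Nat :=
  if h : i < cs.length then
    if PySem.Chars.isspace cs[i] then bSkipWs cs (i + 1) else i
  else i
termination_by cs.length - i

-- i ≤ bSkipWs cs i  (needed by bOuter's termination)
theorem pvSkipGe (cs : List Char) (i : Nat) : i ≤ bSkipWs cs i := by
  unfold bSkipWs
  split
  · split
    · have := pvSkipGe cs (i + 1); omega
    · exact le_refl i
  · exact le_refl i
termination_by cs.length - i
decreasing_by rename_i h _; omega

-- outer loop: skip whitespace, then consume a '--' if present (subtitle[i:i+2] == '--')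
def bOuter (cs : List Char) (i : Nat) : Nat :=
  if PySem.List.slice cs (some ((bSkipWs cs i : Nat) : Int)) (some (((bSkipWs cs i : Nat) : Int) + 2)) = ['-', '-'] then
    bOuter cs (bSkipWs cs i + 2)
  else bSkipWs cs i
termination_by cs.length - i
decreasing_by
  rename_i h
  have hij : i ≤ bSkipWs cs i := pvSkipGe cs i
  set j := bSkipWs cs i with hj
  have hsl : PySem.List.slice cs (some (j : Int)) (some ((j : Int) + 2)) = (cs.drop j).take 2 := by
    simpa using PySem.List.slice_natCast_add (xs := cs) (j := j) (n := 2)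
  rw [hsl] at h
  have hl : 2 ≤ (cs.drop j).length := by
    have : ((cs.drop j).take 2).length = 2 := by rw [h]; rfl
    simpa using this
  have : j + 2 ≤ cs.length := by simp at hl; omega
  omega

-- while j > i and subtitle[j-1].isspace(): j -= 1   (cs.getD (j-1) ' ' = subtitle[j-1], exact since the loop keeps i < j ≤ len)
def bRstrip (cs : List Char) (i j : Nat) : Nat :=
  if i < j then
    if PySem.Chars.isspace (cs.getD (j - 1) ' ') then bRstrip cs i (j - 1) else j
  else j
termination_by j

def clean_subtitle_py_alt (subtitle : String) : String :=
  if subtitle = "" then ""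
  else
    String.ofList (PySem.List.slice subtitle.toList
      (some ((bOuter subtitle.toList 0 : Nat) : Int))
      (some ((bRstrip subtitle.toList (bOuter subtitle.toList 0) subtitle.toList.length : Nat) : Int)))

-- ===== PRECONDITION & SPEC =====
def Spec_clean_subtitle_py (subtitle : String) (out : String) : Prop := out = clean_subtitle_py_alt subtitle
instance (subtitle : String) (out : String) : Decidable (Spec_clean_subtitle_py subtitle out) := by unfold Spec_clean_subtitle_py; infer_instance

-- ===== CLAIM (what is proved, stated in full; the proofs are below) =====
def Claim_equal_clean_subtitle_py : Prop := ∀ (subtitle : String), Dom_clean_subtitle_py subtitle → Spec_clean_subtitle_py subtitle (clean_subtitle_py subtitle)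

-- ===== LEMMAS AND PROOFS =====

-- spec-side description of the front cleaning: drop leading whitespace, then a '--' group, repeat
def front (t : List Char) : List Char :=
  if ((t.dropWhile PySem.Chars.isspace).take 2) = ['-', '-'] then
    front ((t.dropWhile PySem.Chars.isspace).drop 2)
  else t.dropWhile PySem.Chars.isspace
termination_by t.length
decreasing_by
  rename_i h
  have hu : (t.dropWhile PySem.Chars.isspace).length ≤ t.length := List.length_dropWhile_le _ _
  have h2 : 2 ≤ (t.dropWhile PySem.Chars.isspace).length := by
    have : ((t.dropWhile PySem.Chars.isspace).take 2).length = 2 := by rw [h]; rfl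
    simp at this; omega
  simp; omega

theorem rstrip_nil_iff (t : List Char) :
    PySem.Chars.rstrip t = [] ↔ ∀ c ∈ t, PySem.Chars.isspace c := by
  simp [PySem.Chars.rstrip, List.dropWhile_eq_nil_iff]

theorem rstrip_concat (x : List Char) (a : Char) :
    PySem.Chars.rstrip (x ++ [a]) =
      if PySem.Chars.isspace a then PySem.Chars.rstrip x else x ++ [a] := by
  simp only [PySem.Chars.rstrip, List.reverse_append, List.reverse_cons, List.reverse_nil,
    List.nil_append, List.singleton_append, List.dropWhile_cons]
  by_cases ha : PySem.Chars.isspace a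
  · simp [ha]
  · simp [ha]

theorem rstrip_cons (a : Char) (t : List Char) :
    PySem.Chars.rstrip (a :: t) =
      if PySem.Chars.rstrip t = [] then (if PySem.Chars.isspace a then [] else [a])
      else a :: PySem.Chars.rstrip t := by
  simp only [PySem.Chars.rstrip, List.reverse_cons, List.dropWhile_append]
  by_cases h0 : (t.reverse.dropWhile PySem.Chars.isspace) = []
  · simp [h0, List.dropWhile_cons]
    by_cases ha : PySem.Chars.isspace a <;> simp [ha]
  · simp [List.isEmpty_iff, h0]

theorem dropWhile_idem (p : Char → Bool) (l : List Char) :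
    (l.dropWhile p).dropWhile p = l.dropWhile p := by
  induction l with
  | nil => rfl
  | cons a t ih =>
    by_cases ha : p a <;> simp [ha, ih]

theorem rstrip_idem (t : List Char) :
    PySem.Chars.rstrip (PySem.Chars.rstrip t) = PySem.Chars.rstrip t := by
  simp [PySem.Chars.rstrip, dropWhile_idem]

theorem ws_dash : PySem.Chars.isspace '-' = false := by decide

theorem rstrip_dash_dash (t : List Char) :
    PySem.Chars.rstrip ('-' :: '-' :: t) = '-' :: '-' :: PySem.Chars.rstrip t := by
  rw [rstrip_cons, rstrip_cons]
  by_cases h0 : PySem.Chars.rstrip t = [] <;> simp [h0, ws_dash]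

theorem strip_of_rstrip_nil (t : List Char) (h : PySem.Chars.rstrip t = []) :
    PySem.Chars.strip t = [] := by
  rw [PySem.Chars.strip, rstrip_nil_iff]
  intro c hc
  exact (rstrip_nil_iff t).mp h c ((List.dropWhile_suffix _).subset hc)

theorem strip_eq (x : List Char) :
    PySem.Chars.strip x = PySem.Chars.rstrip (x.dropWhile PySem.Chars.isspace) := rfl

theorem strip_rstrip (t : List Char) :
    PySem.Chars.strip (PySem.Chars.rstrip t) = PySem.Chars.strip t := by
  induction t with
  | nil => rfl
  | cons a t ih =>
    rw [rstrip_cons]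
    by_cases h0 : PySem.Chars.rstrip t = []
    · rw [if_pos h0]
      by_cases ha : PySem.Chars.isspace a
      · rw [if_pos ha]
        have h1 : PySem.Chars.strip (a :: t) = [] :=
          strip_of_rstrip_nil _ (by rw [rstrip_cons, if_pos h0, if_pos ha])
        rw [h1]; rfl
      · rw [if_neg ha, strip_eq, strip_eq]
        simp only [List.dropWhile_cons, ha, if_false, Bool.false_eq_true]
        rw [rstrip_cons, rstrip_cons, if_pos h0]
        have : PySem.Chars.rstrip ([] : List Char) = [] := rfl
        rw [if_pos this]
    · rw [if_neg h0]
      by_cases ha : PySem.Chars.isspace a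
      · rw [strip_eq, strip_eq]
        simp only [List.dropWhile_cons, ha, if_true]
        rw [strip_eq, strip_eq] at ih
        exact ih
      · rw [strip_eq, strip_eq]
        simp only [List.dropWhile_cons, ha, if_false, Bool.false_eq_true]
        rw [rstrip_cons a (PySem.Chars.rstrip t), rstrip_idem, if_neg h0,
          rstrip_cons a t, if_neg h0]

theorem rstrip_prefix (x : List Char) : PySem.Chars.rstrip x <+: x := by
  have h := List.dropWhile_suffix (l := x.reverse) PySem.Chars.isspace
  have h2 : (PySem.Chars.rstrip x).reverse <:+ x.reverse := by
    simpa [PySem.Chars.rstrip] using h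
  exact List.reverse_suffix.mp h2

theorem take_two_dash (v : List Char) (h : v.take 2 = ['-', '-']) :
    ∃ v', v = '-' :: '-' :: v' := by
  match v, h with
  | a :: b :: v', h =>
    simp [List.take] at h
    exact ⟨v', by simp [h.1, h.2]⟩

-- A's loop computes rstrip ∘ front
theorem aLoop_strip (u : List Char) :
    aLoop (PySem.Chars.strip u) = PySem.Chars.rstrip (front u) := by
  rw [front]
  by_cases hv : (u.dropWhile PySem.Chars.isspace).take 2 = ['-', '-']
  · obtain ⟨v', hv'⟩ := take_two_dash _ hv
    rw [if_pos hv, strip_eq, hv', rstrip_dash_dash]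
    rw [aLoop]
    have hsw : PySem.Chars.startswith ('-' :: '-' :: PySem.Chars.rstrip v') ['-', '-'] = true := by
      simp [PySem.Chars.startswith, List.isPrefixOf]
    rw [if_pos hsw]
    have hslice : PySem.List.slice ('-' :: '-' :: PySem.Chars.rstrip v') (some 2) none
        = PySem.Chars.rstrip v' := by
      simpa using PySem.List.slice_from (xs := '-' :: '-' :: PySem.Chars.rstrip v') (a := 2) (by norm_num)
    rw [hslice, strip_rstrip]
    have hrec := aLoop_strip v'
    rw [hrec]
    simp
  · rw [if_neg hv, strip_eq, aLoop]
    have hsw : PySem.Chars.startswith (PySem.Chars.rstrip (u.dropWhile PySem.Chars.isspace)) ['-', '-'] = false := by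
      by_contra hc
      have hc2 : PySem.Chars.startswith (PySem.Chars.rstrip (u.dropWhile PySem.Chars.isspace)) ['-', '-'] = true := by
        cases hb : PySem.Chars.startswith (PySem.Chars.rstrip (u.dropWhile PySem.Chars.isspace)) ['-', '-'] <;> simp_all
      have hp : ['-', '-'] <+: PySem.Chars.rstrip (u.dropWhile PySem.Chars.isspace) :=
        (PySem.Chars.startswith_iff _ _).mp hc2
      have hp2 : ['-', '-'] <+: u.dropWhile PySem.Chars.isspace :=
        hp.trans (rstrip_prefix _)
      have := List.prefix_iff_eq_take.mp hp2
      exact hv this.symm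
    rw [if_neg (by simp [hsw])]
termination_by u.length
decreasing_by
  have hu : (u.dropWhile PySem.Chars.isspace).length ≤ u.length := List.length_dropWhile_le _ _
  rw [hv'] at hu
  simp at hu
  omega

theorem aLoop_no_prefix (t : List Char) :
    PySem.Chars.startswith (aLoop t) ['-', '-'] = false := by
  rw [aLoop]
  by_cases h : PySem.Chars.startswith t ['-', '-']
  · rw [if_pos h]; exact aLoop_no_prefix _
  · rw [if_neg (by simp [h])]
    cases hb : PySem.Chars.startswith t ['-', '-'] <;> simp_all
termination_by t.length
decreasing_by
  have h2 : ['-', '-'] <+: t := (PySem.Chars.startswith_iff t ['-', '-']).mp h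
  have hlen : 2 ≤ t.length := by have := h2.length_le; simpa using this
  have hs : PySem.List.slice t (some 2) none = t.drop 2 := by
    simpa using PySem.List.slice_from (xs := t) (a := 2) (by norm_num)
  rw [hs]
  have := pvStripLenLe (t.drop 2)
  have : (PySem.Chars.strip (t.drop 2)).length ≤ t.length - 2 := by simpa using this
  omega

-- B-side loop characterisations
theorem bSkipWs_spec (cs : List Char) (i : Nat) (hi : i ≤ cs.length) :
    cs.drop (bSkipWs cs i) = (cs.drop i).dropWhile PySem.Chars.isspace ∧ bSkipWs cs i ≤ cs.length := by
  rw [bSkipWs]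
  by_cases h : i < cs.length
  · rw [dif_pos h]
    have hdrop : cs.drop i = cs[i] :: cs.drop (i + 1) := List.drop_eq_getElem_cons h
    by_cases hw : PySem.Chars.isspace cs[i]
    · rw [if_pos hw]
      have hrec := bSkipWs_spec cs (i + 1) (by omega)
      rw [hdrop, List.dropWhile_cons, if_pos hw]
      exact hrec
    · rw [if_neg hw, hdrop, List.dropWhile_cons, if_neg hw]
      exact ⟨rfl, by omega⟩
  · rw [dif_neg h]
    have : i = cs.length := by omega
    subst this
    simp
termination_by cs.length - i
decreasing_by omega

theorem bOuter_spec (cs : List Char) (i : Nat) (hi : i ≤ cs.length) :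
    cs.drop (bOuter cs i) = front (cs.drop i) ∧ bOuter cs i ≤ cs.length := by
  rw [bOuter, front]
  obtain ⟨hd, hle⟩ := bSkipWs_spec cs i hi
  have hij : i ≤ bSkipWs cs i := pvSkipGe cs i
  set j := bSkipWs cs i with hj
  have hslice : PySem.List.slice cs (some (j : Int)) (some ((j : Int) + 2)) = (cs.drop j).take 2 := by
    simpa using PySem.List.slice_natCast_add (xs := cs) (j := j) (n := 2)
  rw [hslice, hd]
  by_cases h : ((cs.drop i).dropWhile PySem.Chars.isspace).take 2 = ['-', '-']
  · rw [if_pos h, if_pos h]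
    have h2 : 2 ≤ ((cs.drop i).dropWhile PySem.Chars.isspace).length := by
      have : (((cs.drop i).dropWhile PySem.Chars.isspace).take 2).length = 2 := by rw [h]; rfl
      simp at this; omega
    have hj2 : j + 2 ≤ cs.length := by
      rw [← hd] at h2
      simp at h2
      omega
    have hrec := bOuter_spec cs (j + 2) hj2
    rw [hrec.1]
    refine ⟨?_, hrec.2⟩
    congr 1
    rw [← List.drop_drop, hd]
  · rw [if_neg h, if_neg h]
    exact ⟨hd, hle⟩
termination_by cs.length - i
decreasing_by omega

theorem bRstrip_spec (cs : List Char) (i j : Nat) (hij : i ≤ j) (hj : j ≤ cs.length) :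
    (cs.drop i).take (bRstrip cs i j - i) = PySem.Chars.rstrip ((cs.drop i).take (j - i)) ∧
      i ≤ bRstrip cs i j ∧ bRstrip cs i j ≤ j := by
  rw [bRstrip]
  by_cases h : i < j
  · rw [if_pos h]
    have hjl : j - 1 < cs.length := by omega
    have hget : cs.getD (j - 1) ' ' = cs[j - 1] := List.getD_eq_getElem cs ' ' hjl
    have hidx : j - 1 - i < (cs.drop i).length := by simp; omega
    have hgd : (cs.drop i)[j - 1 - i]'hidx = cs[j - 1] := by
      rw [List.getElem_drop]
      congr 1
      omega
    have hu : (cs.drop i).take (j - i) = (cs.drop i).take (j - 1 - i) ++ [cs[j - 1]] := by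
      have hsucc : j - i = (j - 1 - i) + 1 := by omega
      rw [hsucc, List.take_add_one]
      congr 1
      rw [List.getElem?_eq_getElem hidx, hgd]
      rfl
    by_cases hw : PySem.Chars.isspace (cs.getD (j - 1) ' ')
    · rw [if_pos hw]
      have hrec := bRstrip_spec cs i (j - 1) (by omega) (by omega)
      refine ⟨?_, by omega, by omega⟩
      rw [hrec.1, hu, rstrip_concat, if_pos (by rw [← hget]; exact hw)]
    · rw [if_neg hw]
      refine ⟨?_, by omega, by omega⟩
      rw [hu, rstrip_concat, if_neg (by rw [← hget]; exact hw), ← hu]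
  · rw [if_neg h]
    have : j = i := by omega
    subst this
    simp [PySem.Chars.rstrip]
termination_by j - i
decreasing_by omega

theorem main_eq (s : String) : clean_subtitle_py s = clean_subtitle_py_alt s := by
  by_cases hs : s = ""
  · rw [clean_subtitle_py, clean_subtitle_py_alt, if_pos hs, if_pos hs]
  · rw [clean_subtitle_py, clean_subtitle_py_alt, if_neg hs, if_neg hs]
    set cs := s.toList with hcs
    -- A side
    have hA : aLoop (PySem.Chars.strip cs) = PySem.Chars.rstrip (front cs) := aLoop_strip cs
    have hne : aLoop (PySem.Chars.strip cs) ≠ ['-', '-'] := by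
      intro hc
      have h1 := aLoop_no_prefix (PySem.Chars.strip cs)
      rw [hc] at h1
      simp [PySem.Chars.startswith, List.isPrefixOf] at h1
    -- B side
    obtain ⟨hBo, hBole⟩ := bOuter_spec cs 0 (by omega)
    simp only [List.drop_zero] at hBo
    obtain ⟨hBr, hBr1, hBr2⟩ := bRstrip_spec cs (bOuter cs 0) cs.length hBole le_rfl
    have hfull : (cs.drop (bOuter cs 0)).take (cs.length - bOuter cs 0) = cs.drop (bOuter cs 0) := by
      have hl : (cs.drop (bOuter cs 0)).length = cs.length - bOuter cs 0 := by simp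
      rw [← hl, List.take_length]
    have hslice : PySem.List.slice cs (some ((bOuter cs 0 : Nat) : Int))
        (some ((bRstrip cs (bOuter cs 0) cs.length : Nat) : Int))
        = (cs.drop (bOuter cs 0)).take (bRstrip cs (bOuter cs 0) cs.length - bOuter cs 0) :=
      PySem.List.slice_natCast cs (bOuter cs 0) (bRstrip cs (bOuter cs 0) cs.length)
    rw [hslice, hBr, hfull, hBo]
    -- combine
    by_cases h0 : aLoop (PySem.Chars.strip cs) = []
    · rw [if_pos (Or.inr h0), ← hA, h0]
    · rw [if_neg (by simp [hne, h0]), hA]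

-- ===== VERDICT (by name: the statement is the Claim_ definition above) =====
theorem clean_subtitle_py_spec : Claim_equal_clean_subtitle_py := by
  intro s _
  unfold Spec_clean_subtitle_py
  exact main_eq s
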